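-- pv_equiv track=rewrite | github.com/kljwl/project | dataset/check_dataset.py | check_token_coverage
-- ===== SOURCE A (Python) =====
-- from typing import Dict, List, Tuple
--
-- def check_token_coverage(text: str, vocab: Dict[str, int]) -> Tuple[List[str], bool]:
--     """检查文本中的字符是否都在词汇表中"""
--     missing_chars = []
--     all_covered = True
--
--     # 先检查多字符token
--     special_tokens = sorted([token for token in vocab.keys() if len(token) > 1],
--                            key=len, reverse=True)
--
--     i = 0
--     text_len = len(text)
--     checked_positions = set()
--
--     while i < text_len:
--         matched = False
--
--         # 尝试匹配多字符token
--         for token in special_tokens: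
--             if i + len(token) <= text_len and text[i:i+len(token)] == token:
--                 for pos in range(i, i + len(token)):
--                     checked_positions.add(pos)
--                 i += len(token)
--                 matched = True
--                 break
--
--         # 如果没有匹配到多字符token，检查单字符
--         if not matched:
--             char = text[i]
--             if char not in vocab:
--                 if char not in missing_chars:
--                     missing_chars.append(char)
--                 all_covered = False
--             checked_positions.add(i)
--             i += 1
--
--     return missing_chars, all_covered
-- ===== SOURCE B (Python) =====
-- def check_token_coverage(text, vocab):
--     """检查文本中的字符是否都在词汇表中"""
--     # Staged: (1) greedy longest-match walk over text emitting the characters not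
--     # consumed by any multi-char token, probing one slice per candidate length
--     # (longest first) against a hash-set of tokens; (2) derive missing chars and
--     # the coverage flag from that emitted character stream.
--     multi = {t for t in vocab if len(t) > 1}
--     maxlen = max(map(len, multi), default=0)
--     singles = []
--     i, n = 0, len(text)
--     while i < n:
--         for L in range(min(maxlen, n - i), 1, -1):
--             if text[i:i+L] in multi:
--                 i += L
--                 break
--         else:
--             singles.append(text[i])
--             i += 1
--     missing = []
--     for c in singles:
--         if c not in vocab and c not in missing:
--             missing.append(c)
--     return missing, all(c in vocab for c in singles)
-- ===== Notes on version B (the rewrite author's own statement) =====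
-- stated objective: faster
-- what changed: Replaces A's single stateful while-loop (scanning the whole sorted multi-char-token list at every position) with two staged passes: a greedy longest-match walk probing one hash-set slice per candidate length (descending, capped by the longest token) that emits the unconsumed characters, then a separate dedup/membership pass over that stream for the missing list and an all() for the flag.
import Mathlib
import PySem

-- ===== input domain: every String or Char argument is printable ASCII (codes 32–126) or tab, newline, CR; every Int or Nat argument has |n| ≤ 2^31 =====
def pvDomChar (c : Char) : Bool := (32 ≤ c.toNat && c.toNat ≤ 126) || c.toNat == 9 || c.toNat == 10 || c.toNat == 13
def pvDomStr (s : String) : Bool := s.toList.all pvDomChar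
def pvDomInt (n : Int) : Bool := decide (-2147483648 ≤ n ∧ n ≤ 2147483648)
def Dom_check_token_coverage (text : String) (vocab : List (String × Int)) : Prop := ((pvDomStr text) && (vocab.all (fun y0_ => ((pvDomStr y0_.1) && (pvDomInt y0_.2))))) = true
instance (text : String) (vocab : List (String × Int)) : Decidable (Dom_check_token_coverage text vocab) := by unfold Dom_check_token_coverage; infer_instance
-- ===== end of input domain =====

-- B restructures A's single stateful while-loop into two staged passes: a greedy
-- longest-match walk (probing one hash-set slice per candidate length, descending,
-- instead of scanning the whole sorted token list per position) that emits the
-- unconsumed characters, then a dedup/membership pass over that stream.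
-- Return values proved equal on all inputs.

-- ===== PORT A =====

-- special_tokens = sorted([token for token in vocab.keys() if len(token) > 1], key=len, reverse=True)
def pvSpecialA (vocab : List (String × Int)) : List String :=
  PySem.List.sorted ((vocab.map Prod.fst).filter (fun t => 1 < t.toList.length)) PySem.Str.len true

-- the inner `for token in special_tokens: … break` — first token matching at position i
def pvFindTokA (cs : List Char) (i : Nat) : List String → Option String
  | [] => none
  | t :: ts =>
    if i + t.toList.length ≤ cs.length ∧
        PySem.List.slice cs (some (i : Int)) (some ((i : Int) + (t.toList.length : Int))) = t.toList
    then some t else pvFindTokA cs i ts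

-- the `while i < text_len` loop; fuel = len(text) bounds the iteration count (each step i += ≥ 1)
def pvLoopA (cs : List Char) (keys : List String) (special : List String) :
    Nat → Nat → List String → Bool → PySem.Set Int → List String × Bool
  | 0, _, missing, cov, _ => (missing, cov)
  | fuel + 1, i, missing, cov, checked =>
    if i < cs.length then
      match pvFindTokA cs i special with
      | some t =>
          let checked' := (PySem.List.pyRange (i : Int) ((i : Int) + (t.toList.length : Int)) 1).foldl
            (fun s p => s.add p) checked
          pvLoopA cs keys special fuel (i + t.toList.length) missing cov checked'
      | none =>
          -- char = text[i]
          if ¬ keys.contains (String.ofList [PySem.List.pyGetD cs (i : Int) ' ']) then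
            (if ¬ missing.contains (String.ofList [PySem.List.pyGetD cs (i : Int) ' ']) then
              pvLoopA cs keys special fuel (i + 1)
                (missing ++ [String.ofList [PySem.List.pyGetD cs (i : Int) ' ']]) false
                (checked.add (i : Int))
            else
              pvLoopA cs keys special fuel (i + 1) missing false (checked.add (i : Int)))
          else
            pvLoopA cs keys special fuel (i + 1) missing cov (checked.add (i : Int))
    else (missing, cov)

def check_token_coverage (text : String) (vocab : List (String × Int)) : List String × Bool :=
  let cs := text.toList
  pvLoopA cs (vocab.map Prod.fst) (pvSpecialA vocab) cs.length 0 [] true PySem.Set.empty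

-- ===== PORT B =====

-- multi = {t for t in vocab if len(t) > 1}
def pvMultiB (vocab : List (String × Int)) : PySem.Set String :=
  PySem.Set.ofList ((vocab.map Prod.fst).filter (fun t => 1 < t.toList.length))

-- maxlen = max(map(len, multi), default=0)
def pvMaxLenB (vocab : List (String × Int)) : Int :=
  PySem.List.maxD ((pvMultiB vocab).map PySem.Str.len) (fun L => L) 0

-- the inner `for L in range(min(maxlen, n - i), 1, -1): … break/else`
def pvFindLenB (cs : List Char) (multi : PySem.Set String) (i : Nat) : List Int → Option Int
  | [] => none
  | L :: Ls =>
    if multi.contains (String.ofList (PySem.List.slice cs (some (i : Int)) (some ((i : Int) + L)))) = true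
    then some L else pvFindLenB cs multi i Ls

-- pass 1: the walk, emitting the characters not consumed by a multi-char token;
-- fuel = len(text) bounds the iteration count (each step i += ≥ 1)
def pvWalkB (cs : List Char) (multi : PySem.Set String) (maxlen : Int) :
    Nat → Nat → List Char
  | 0, _ => []
  | fuel + 1, i =>
    if i < cs.length then
      match pvFindLenB cs multi i
          (PySem.List.pyRange (min maxlen ((cs.length : Int) - (i : Int))) 1 (-1)) with
      | some L => pvWalkB cs multi maxlen fuel (i + L.toNat)
      | none => PySem.List.pyGetD cs (i : Int) ' ' :: pvWalkB cs multi maxlen fuel (i + 1)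
    else []

def check_token_coverage_alt (text : String) (vocab : List (String × Int)) : List String × Bool :=
  let cs := text.toList
  let singles := pvWalkB cs (pvMultiB vocab) (pvMaxLenB vocab) cs.length 0
  -- pass 2: missing = first-occurrence dedup of uncovered chars; all(c in vocab …)
  (singles.foldl (fun missing c =>
      if ¬ (vocab.map Prod.fst).contains (String.ofList [c]) ∧
          ¬ missing.contains (String.ofList [c])
      then missing ++ [String.ofList [c]] else missing) [],
   singles.all (fun c => (vocab.map Prod.fst).contains (String.ofList [c])))

-- ===== PRECONDITION & SPEC =====
def Spec_check_token_coverage (text : String) (vocab : List (String × Int)) (out : List String × Bool) : Prop := out = check_token_coverage_alt text vocab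
instance (text : String) (vocab : List (String × Int)) (out : List String × Bool) : Decidable (Spec_check_token_coverage text vocab out) := by unfold Spec_check_token_coverage; infer_instance

-- ===== CLAIM (what is proved, stated in full; the proofs are below) =====
def Claim_equal_check_token_coverage : Prop := ∀ (text : String) (vocab : List (String × Int)), Dom_check_token_coverage text vocab → Spec_check_token_coverage text vocab (check_token_coverage text vocab)

-- ===== LEMMAS AND PROOFS =====

-- A's match predicate at position i for a token's char list
def pvM (cs : List Char) (i : Nat) (t : List Char) : Prop :=
  i + t.length ≤ cs.length ∧
    PySem.List.slice cs (some (i : Int)) (some ((i : Int) + (t.length : Int))) = t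

lemma findTokA_none {cs : List Char} {i : Nat} {l : List String} :
    pvFindTokA cs i l = none ↔ ∀ t ∈ l, ¬ pvM cs i t.toList := by
  induction l with
  | nil => simp [pvFindTokA]
  | cons t ts ih =>
    rw [pvFindTokA]
    by_cases h : i + t.toList.length ≤ cs.length ∧
        PySem.List.slice cs (some (i : Int)) (some ((i : Int) + (t.toList.length : Int))) = t.toList
    · rw [if_pos h]
      constructor
      · intro h'; exact absurd h' (by simp)
      · intro hall; exact absurd h (hall t List.mem_cons_self)
    · rw [if_neg h]
      constructor
      · intro hnone u hu
        rcases List.mem_cons.mp hu with h' | h'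
        · subst h'; exact h
        · exact (ih.mp hnone) u h'
      · intro hall; exact ih.mpr (fun u hu => hall u (List.mem_cons_of_mem _ hu))

lemma findTokA_some {cs : List Char} {i : Nat} {l : List String} {t : String}
    (hp : l.Pairwise (fun a b => PySem.Str.len b ≤ PySem.Str.len a))
    (h : pvFindTokA cs i l = some t) :
    pvM cs i t.toList ∧ t ∈ l ∧ ∀ u ∈ l, pvM cs i u.toList → u.toList.length ≤ t.toList.length := by
  induction l with
  | nil => exact absurd h (by simp [pvFindTokA])
  | cons a ts ih =>
    rw [List.pairwise_cons] at hp
    by_cases ha : i + a.toList.length ≤ cs.length ∧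
        PySem.List.slice cs (some (i : Int)) (some ((i : Int) + (a.toList.length : Int))) = a.toList
    · rw [pvFindTokA, if_pos ha] at h
      cases h
      refine ⟨ha, List.mem_cons_self, ?_⟩
      intro u hu _
      rcases List.mem_cons.mp hu with h' | h'
      · subst h'; omega
      · have := hp.1 u h'
        rw [PySem.Str.len_eq, PySem.Str.len_eq] at this
        omega
    · rw [pvFindTokA, if_neg ha] at h
      obtain ⟨h1, h2, h3⟩ := ih hp.2 h
      refine ⟨h1, List.mem_cons_of_mem _ h2, ?_⟩
      intro u hu hm
      rcases List.mem_cons.mp hu with h' | h'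
      · subst h'; exact absurd hm ha
      · exact h3 u h' hm

-- B's predicate at candidate length L
def pvQ (cs : List Char) (multi : PySem.Set String) (i : Nat) (L : Int) : Prop :=
  multi.contains (String.ofList (PySem.List.slice cs (some (i : Int)) (some ((i : Int) + L)))) = true

lemma findLenB_none {cs : List Char} {multi : PySem.Set String} {i : Nat} {l : List Int} :
    pvFindLenB cs multi i l = none ↔ ∀ L ∈ l, ¬ pvQ cs multi i L := by
  unfold pvQ
  induction l with
  | nil => simp [pvFindLenB]
  | cons L Ls ih =>
    rw [pvFindLenB]
    by_cases h : multi.contains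
        (String.ofList (PySem.List.slice cs (some (i : Int)) (some ((i : Int) + L)))) = true
    · rw [if_pos h]
      constructor
      · intro h'; exact absurd h' (by simp)
      · intro hall; exact absurd h (hall L List.mem_cons_self)
    · rw [if_neg h]
      constructor
      · intro hnone L' hL'
        rcases List.mem_cons.mp hL' with h' | h'
        · subst h'; exact h
        · exact (ih.mp hnone) L' h'
      · intro hall; exact ih.mpr (fun L' hL' => hall L' (List.mem_cons_of_mem _ hL'))

lemma findLenB_some {cs : List Char} {multi : PySem.Set String} {i : Nat} {l : List Int} {L : Int}
    (hp : l.Pairwise (fun a b => b ≤ a))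
    (h : pvFindLenB cs multi i l = some L) :
    pvQ cs multi i L ∧ L ∈ l ∧ ∀ L' ∈ l, pvQ cs multi i L' → L' ≤ L := by
  unfold pvQ
  induction l with
  | nil => exact absurd h (by simp [pvFindLenB])
  | cons a Ls ih =>
    rw [List.pairwise_cons] at hp
    by_cases ha : multi.contains
        (String.ofList (PySem.List.slice cs (some (i : Int)) (some ((i : Int) + a)))) = true
    · rw [pvFindLenB, if_pos ha] at h
      cases h
      refine ⟨ha, List.mem_cons_self, ?_⟩
      intro L' hL' _
      rcases List.mem_cons.mp hL' with h' | h'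
      · omega
      · exact hp.1 L' h'
    · rw [pvFindLenB, if_neg ha] at h
      obtain ⟨h1, h2, h3⟩ := ih hp.2 h
      refine ⟨h1, List.mem_cons_of_mem _ h2, ?_⟩
      intro L' hL' hm
      rcases List.mem_cons.mp hL' with h' | h'
      · subst h'; exact absurd hm ha
      · exact h3 L' h' hm

-- slice of a fitting length L has length exactly L
lemma slice_len {cs : List Char} {i L : Nat} (h : i + L ≤ cs.length) :
    (PySem.List.slice cs (some (i : Int)) (some ((i : Int) + (L : Int)))).length = L := by
  rw [PySem.List.slice_natCast_add]
  rw [List.length_take, List.length_drop]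
  omega

-- B's candidate-length list at position i
def pvCands (vocab : List (String × Int)) (cs : List Char) (i : Nat) : List Int :=
  PySem.List.pyRange (min (pvMaxLenB vocab) ((cs.length : Int) - (i : Int))) 1 (-1)

lemma cands_pairwise (vocab : List (String × Int)) (cs : List Char) (i : Nat) :
    (pvCands vocab cs i).Pairwise (fun a b => b ≤ a) := by
  unfold pvCands
  rw [PySem.List.pyRange_neg_one_eq_reverse, List.pairwise_reverse]
  exact (PySem.List.pairwise_lt_pyRange_one _ _).imp (fun h => le_of_lt h)

-- bridge: a multi-char token matching at i yields B's predicate at its length,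
-- and that length lies in B's candidate list
lemma bridge_tok_to_len {vocab : List (String × Int)} {cs : List Char} {i : Nat} {t : String}
    (ht : t ∈ pvSpecialA vocab) (hm : pvM cs i t.toList) :
    pvQ cs (pvMultiB vocab) i (t.toList.length : Int) ∧
      (t.toList.length : Int) ∈ pvCands vocab cs i := by
  have ht' : t ∈ (vocab.map Prod.fst).filter (fun t => 1 < t.toList.length) := by
    rw [← PySem.List.mem_sorted _ PySem.Str.len true]; exact ht
  have htmem : t ∈ pvMultiB vocab := by
    unfold pvMultiB; rw [PySem.Set.mem_ofList]; exact ht'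
  have hlong : 1 < t.toList.length := by
    have := List.of_mem_filter ht'
    simpa using this
  constructor
  · unfold pvQ
    rw [hm.2, String.ofList_toList, PySem.Set.contains_iff]
    exact htmem
  · unfold pvCands
    rw [PySem.List.mem_pyRange_neg_one]
    have hmax : PySem.Str.len t ≤ pvMaxLenB vocab :=
      PySem.List.le_maxD_id ((pvMultiB vocab).map PySem.Str.len) 0 _
        (List.mem_map.mpr ⟨t, htmem, rfl⟩)
    rw [PySem.Str.len_eq] at hmax
    have hfit := hm.1
    constructor
    · exact_mod_cast hlong
    · rw [le_min_iff]
      exact ⟨hmax, by omega⟩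

-- bridge: each candidate length satisfying B's predicate comes from a matching multi-char token
lemma bridge_len_to_tok {vocab : List (String × Int)} {cs : List Char} {i : Nat} {L : Int}
    (hL : L ∈ pvCands vocab cs i) (hQ : pvQ cs (pvMultiB vocab) i L) :
    ∃ t, t ∈ pvSpecialA vocab ∧ pvM cs i t.toList ∧ (t.toList.length : Int) = L := by
  unfold pvCands at hL
  rw [PySem.List.mem_pyRange_neg_one] at hL
  have hL1 : 1 < L := hL.1
  have hLfit : L ≤ (cs.length : Int) - (i : Int) := le_trans hL.2 (min_le_right _ _)
  have hLnat : L = ((L.toNat : Nat) : Int) := by omega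
  have hfit : i + L.toNat ≤ cs.length := by omega
  unfold pvQ at hQ
  rw [hLnat, PySem.Set.contains_iff] at hQ
  unfold pvMultiB at hQ
  rw [PySem.Set.mem_ofList] at hQ
  refine ⟨String.ofList (PySem.List.slice cs (some (i : Int)) (some ((i : Int) + ((L.toNat : Nat) : Int)))), ?_, ?_, ?_⟩
  · unfold pvSpecialA
    rw [PySem.List.mem_sorted]
    exact hQ
  · constructor
    · rw [String.toList_ofList, slice_len hfit]; exact hfit
    · rw [String.toList_ofList, slice_len hfit]
  · rw [String.toList_ofList, slice_len hfit]; omega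

-- the STEP lemma: at every position, B's descending length probe finds exactly
-- the length of A's first matching token
lemma step_eq (vocab : List (String × Int)) (cs : List Char) (i : Nat) :
    pvFindLenB cs (pvMultiB vocab) i (pvCands vocab cs i) =
      Option.map (fun t => ((t.toList.length : Nat) : Int)) (pvFindTokA cs i (pvSpecialA vocab)) := by
  have hpA : (pvSpecialA vocab).Pairwise (fun a b => PySem.Str.len b ≤ PySem.Str.len a) :=
    PySem.List.sorted_pairwise_rev _ _
  have hpB := cands_pairwise vocab cs i
  cases hA : pvFindTokA cs i (pvSpecialA vocab) with
  | none =>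
    rw [Option.map_none]
    cases hB : pvFindLenB cs (pvMultiB vocab) i (pvCands vocab cs i) with
    | none => rfl
    | some L =>
      rw [findTokA_none] at hA
      obtain ⟨hQ, hmem, _⟩ := findLenB_some hpB hB
      obtain ⟨t, ht, hm, _⟩ := bridge_len_to_tok hmem hQ
      exact absurd hm (hA t ht)
  | some t =>
    obtain ⟨hm, ht, hmax⟩ := findTokA_some hpA hA
    obtain ⟨hQt, hLmem⟩ := bridge_tok_to_len ht hm
    cases hB : pvFindLenB cs (pvMultiB vocab) i (pvCands vocab cs i) with
    | none =>
      rw [findLenB_none] at hB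
      exact absurd hQt (hB _ hLmem)
    | some L =>
      obtain ⟨hQ, hmem, hmaxB⟩ := findLenB_some hpB hB
      obtain ⟨u, hu, hmu, huL⟩ := bridge_len_to_tok hmem hQ
      have h1 : L ≤ (t.toList.length : Int) := by
        have := hmax u hu hmu; omega
      have h2 : (t.toList.length : Int) ≤ L := hmaxB _ hLmem hQt
      rw [Option.map_some, Option.some_inj]
      omega

-- pass-2 step of B, as a fold function
def pvStep2 (vocab : List (String × Int)) (missing : List String) (c : Char) : List String :=
  if ¬ (vocab.map Prod.fst).contains (String.ofList [c]) ∧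
      ¬ missing.contains (String.ofList [c])
  then missing ++ [String.ofList [c]] else missing

-- unfolding equations (the `match` reduces once its scrutinee is a literal constructor)
lemma loopA_not_lt {cs : List Char} {keys special : List String} {n i : Nat}
    {missing : List String} {cov : Bool} {checked : PySem.Set Int} (h : ¬ i < cs.length) :
    pvLoopA cs keys special (n + 1) i missing cov checked = (missing, cov) := by
  rw [pvLoopA, if_neg h]

lemma loopA_some {cs : List Char} {keys special : List String} {n i : Nat}
    {missing : List String} {cov : Bool} {checked : PySem.Set Int} {t : String}
    (h : i < cs.length) (hA : pvFindTokA cs i special = some t) :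
    pvLoopA cs keys special (n + 1) i missing cov checked =
      pvLoopA cs keys special n (i + t.toList.length) missing cov
        ((PySem.List.pyRange (i : Int) ((i : Int) + (t.toList.length : Int)) 1).foldl
          (fun s p => s.add p) checked) := by
  rw [pvLoopA, if_pos h, hA]

lemma loopA_none {cs : List Char} {keys special : List String} {n i : Nat}
    {missing : List String} {cov : Bool} {checked : PySem.Set Int}
    (h : i < cs.length) (hA : pvFindTokA cs i special = none) :
    pvLoopA cs keys special (n + 1) i missing cov checked =
      (if ¬ keys.contains (String.ofList [PySem.List.pyGetD cs (i : Int) ' ']) then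
        (if ¬ missing.contains (String.ofList [PySem.List.pyGetD cs (i : Int) ' ']) then
          pvLoopA cs keys special n (i + 1)
            (missing ++ [String.ofList [PySem.List.pyGetD cs (i : Int) ' ']]) false
            (checked.add (i : Int))
        else
          pvLoopA cs keys special n (i + 1) missing false (checked.add (i : Int)))
      else
        pvLoopA cs keys special n (i + 1) missing cov (checked.add (i : Int))) := by
  rw [pvLoopA, if_pos h, hA]

lemma walkB_not_lt {cs : List Char} {multi : PySem.Set String} {maxlen : Int} {n i : Nat}
    (h : ¬ i < cs.length) : pvWalkB cs multi maxlen (n + 1) i = [] := by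
  rw [pvWalkB, if_neg h]

lemma walkB_some {cs : List Char} {multi : PySem.Set String} {maxlen : Int} {n i : Nat} {L : Int}
    (h : i < cs.length)
    (hf : pvFindLenB cs multi i
      (PySem.List.pyRange (min maxlen ((cs.length : Int) - (i : Int))) 1 (-1)) = some L) :
    pvWalkB cs multi maxlen (n + 1) i = pvWalkB cs multi maxlen n (i + L.toNat) := by
  rw [pvWalkB, if_pos h, hf]

lemma walkB_none {cs : List Char} {multi : PySem.Set String} {maxlen : Int} {n i : Nat}
    (h : i < cs.length)
    (hf : pvFindLenB cs multi i
      (PySem.List.pyRange (min maxlen ((cs.length : Int) - (i : Int))) 1 (-1)) = none) :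
    pvWalkB cs multi maxlen (n + 1) i =
      PySem.List.pyGetD cs (i : Int) ' ' :: pvWalkB cs multi maxlen n (i + 1) := by
  rw [pvWalkB, if_pos h, hf]

-- the loop invariant: A's single loop equals B's pass 1 followed by the fold and `all`
lemma loop_eq (vocab : List (String × Int)) (cs : List Char) :
    ∀ (fuel i : Nat) (missing : List String) (cov : Bool) (checked : PySem.Set Int),
      pvLoopA cs (vocab.map Prod.fst) (pvSpecialA vocab) fuel i missing cov checked =
        ((pvWalkB cs (pvMultiB vocab) (pvMaxLenB vocab) fuel i).foldl (pvStep2 vocab) missing,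
         cov && (pvWalkB cs (pvMultiB vocab) (pvMaxLenB vocab) fuel i).all
           (fun c => (vocab.map Prod.fst).contains (String.ofList [c]))) := by
  intro fuel
  induction fuel with
  | zero =>
    intro i missing cov checked
    simp [pvLoopA, pvWalkB]
  | succ n ih =>
    intro i missing cov checked
    by_cases hi : i < cs.length
    · have hstep := step_eq vocab cs i
      unfold pvCands at hstep
      cases hA : pvFindTokA cs i (pvSpecialA vocab) with
      | some t =>
        rw [hA, Option.map_some] at hstep
        rw [loopA_some hi hA, walkB_some hi hstep, Int.toNat_natCast]
        exact ih _ missing cov _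
      | none =>
        rw [hA, Option.map_none] at hstep
        rw [loopA_none hi hA, walkB_none hi hstep, List.foldl_cons, List.all_cons]
        by_cases hk : (vocab.map Prod.fst).contains
            (String.ofList [PySem.List.pyGetD cs (i : Int) ' ']) = true
        · rw [if_neg (not_not_intro hk), ih]
          have h2 : pvStep2 vocab missing (PySem.List.pyGetD cs (i : Int) ' ') = missing := by
            unfold pvStep2
            rw [if_neg (by intro h; exact h.1 hk)]
          rw [h2, hk, Bool.true_and]
        · have hkf : (vocab.map Prod.fst).contains
              (String.ofList [PySem.List.pyGetD cs (i : Int) ' ']) = false :=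
            Bool.eq_false_iff.mpr hk
          rw [if_pos hk]
          by_cases hc : missing.contains
              (String.ofList [PySem.List.pyGetD cs (i : Int) ' ']) = true
          · rw [if_neg (not_not_intro hc), ih]
            have h2 : pvStep2 vocab missing (PySem.List.pyGetD cs (i : Int) ' ') = missing := by
              unfold pvStep2
              rw [if_neg (by intro h; exact h.2 hc)]
            rw [h2, hkf, Bool.false_and, Bool.and_false]
          · rw [if_pos hc, ih]
            have h2 : pvStep2 vocab missing (PySem.List.pyGetD cs (i : Int) ' ') =
                missing ++ [String.ofList [PySem.List.pyGetD cs (i : Int) ' ']] := by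
              unfold pvStep2
              rw [if_pos ⟨hk, hc⟩]
            rw [h2, hkf, Bool.false_and, Bool.and_false]
    · rw [loopA_not_lt hi, walkB_not_lt hi]
      simp

-- ===== VERDICT (by name: the statement is the Claim_ definition above) =====
theorem check_token_coverage_spec : Claim_equal_check_token_coverage := by
  intro text vocab _
  unfold Spec_check_token_coverage check_token_coverage check_token_coverage_alt
  rw [loop_eq vocab text.toList text.toList.length 0 [] true PySem.Set.empty, Bool.true_and]
  rfl
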